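-- pv_equiv track=rewrite | github.com/seanrcollings/school | cs5060/hw1/main.py | find_optimal_solution
-- ===== SOURCE A (Python) =====
-- def find_optimal_solution(candidates):
--     largest = max(candidates)
--
--     for i in range(1, len(candidates)):
--         max_before = max(candidates[:i])
--
--         for candiate in candidates[i:]:
--             if candiate > max_before:
--                 if candiate == largest:
--                     return i
--                 break
--
--     return None
-- ===== SOURCE B (Python) =====
-- def find_optimal_solution(candidates):
--     largest = max(candidates)
--     m = candidates.index(largest)
--     if m == 0:
--         return None
--     prefix = candidates[:m]
--     return prefix.index(max(prefix)) + 1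
-- ===== Notes on version B (the rewrite author's own statement) =====
-- stated objective: faster
-- what changed: A rescans a prefix-max and a suffix for every stop index (quadratic); B computes the index m of the global maximum and returns 1 + the position of the first maximum of candidates[:m] (None if m == 0), in three linear passes.
-- outside the precondition, e.g. on find_optimal_solution([]): A raises ValueError, B raises ValueError
import Mathlib
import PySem

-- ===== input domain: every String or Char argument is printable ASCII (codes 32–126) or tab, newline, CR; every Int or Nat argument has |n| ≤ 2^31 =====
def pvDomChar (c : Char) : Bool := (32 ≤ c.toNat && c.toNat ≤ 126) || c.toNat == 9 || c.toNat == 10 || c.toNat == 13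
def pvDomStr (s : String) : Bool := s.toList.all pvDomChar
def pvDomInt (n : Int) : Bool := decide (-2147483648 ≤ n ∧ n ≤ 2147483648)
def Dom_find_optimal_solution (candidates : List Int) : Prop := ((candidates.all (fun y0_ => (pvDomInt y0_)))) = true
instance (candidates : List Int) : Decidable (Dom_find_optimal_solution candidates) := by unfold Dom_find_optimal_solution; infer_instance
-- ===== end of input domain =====

-- B replaces A's quadratic nested scan by three linear passes: the answer is 1 + the position of
-- the first maximum of candidates[:index(max)] (None when the global max comes first). Objective: faster.

-- ===== PORT A =====
-- inner loop: 'for candiate in rest: if candiate > max_before: … break' — returns the first element > max_before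
def fosFirstExceed (max_before : Int) : List Int → Option Int
  | [] => none
  | c :: rest => if max_before < c then some c else fosFirstExceed max_before rest

-- outer loop over the values of 'range(1, len(candidates))'
def fosOuter (candidates : List Int) (largest : Int) : List Int → Option Int
  | [] => none
  | i :: is =>
    -- candidates[:i] is nonempty for every i produced by range(1, …), so max? is some; getD's 0 is never used
    let max_before := (PySem.List.max? (PySem.List.slice candidates none (some i)) (fun y => y)).getD 0
    match fosFirstExceed max_before (PySem.List.slice candidates (some i) none) with
    | some c => if c = largest then some i else fosOuter candidates largest is
    | none => fosOuter candidates largest is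

def find_optimal_solution (candidates : List Int) : Option Int :=
  match PySem.List.max? candidates (fun y => y) with
  | none => none  -- Python: max([]) raises ValueError; excluded by Pre_
  | some largest =>
    fosOuter candidates largest (PySem.List.pyRange 1 (PySem.List.len candidates) 1)

-- ===== PORT B =====
def find_optimal_solution_alt (candidates : List Int) : Option Int :=
  match PySem.List.max? candidates (fun y => y) with
  | none => none  -- Python: max([]) raises ValueError; excluded by Pre_
  | some largest =>
    match PySem.List.index? candidates largest with
    | none => none  -- unreachable: largest ∈ candidates
    | some m =>
      if m = 0 then none
      else
        let pfx := PySem.List.slice candidates none (some (m : Int))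
        match PySem.List.max? pfx (fun y => y) with
        | none => none  -- unreachable: pfx nonempty since m ≥ 1
        | some q =>
          match PySem.List.index? pfx q with
          | none => none  -- unreachable: q ∈ prefix
          | some qi => some ((qi : Int) + 1)

-- ===== PRECONDITION & SPEC =====
-- Python A (and B) raise ValueError on max([]) for the empty list; Pre_ excludes exactly that input.
def Pre_find_optimal_solution (candidates : List Int) : Prop := candidates ≠ []
instance (candidates : List Int) : Decidable (Pre_find_optimal_solution candidates) := by unfold Pre_find_optimal_solution; infer_instance
def pvWitness_find_optimal_solution : List Int := [1, 3, 2, 5]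

def Spec_find_optimal_solution (candidates : List Int) (out : Option Int) : Prop := out = find_optimal_solution_alt candidates
instance (candidates : List Int) (out : Option Int) : Decidable (Spec_find_optimal_solution candidates out) := by unfold Spec_find_optimal_solution; infer_instance

-- ===== CLAIM (what is proved, stated in full; the proofs are below) =====
def Claim_equal_find_optimal_solution : Prop := ∀ (candidates : List Int), Dom_find_optimal_solution candidates → Pre_find_optimal_solution candidates → Spec_find_optimal_solution candidates (find_optimal_solution candidates)

-- ===== LEMMAS AND PROOFS =====

-- the loop body of A's outer loop, as a boolean test on the loop variable
def fosCond (candidates : List Int) (largest i : Int) : Bool :=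
  match fosFirstExceed ((PySem.List.max? (PySem.List.slice candidates none (some i)) (fun y => y)).getD 0)
        (PySem.List.slice candidates (some i) none) with
  | some c => decide (c = largest)
  | none => false

theorem fosOuter_eq_find? (candidates : List Int) (largest : Int) (l : List Int) :
    fosOuter candidates largest l = l.find? (fosCond candidates largest) := by
  induction l with
  | nil => rfl
  | cons i is ih =>
    rw [List.find?_cons]
    rcases h : fosFirstExceed ((PySem.List.max? (PySem.List.slice candidates none (some i)) (fun y => y)).getD 0)
        (PySem.List.slice candidates (some i) none) with _ | c
    · simp [fosOuter, fosCond, h, ih]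
    · by_cases hc : c = largest
      · simp [fosOuter, fosCond, h, hc]
      · simp [fosOuter, fosCond, h, hc, ih]

theorem fosFirstExceed_none (mb : Int) (l : List Int) (h : ∀ y ∈ l, y ≤ mb) :
    fosFirstExceed mb l = none := by
  induction l with
  | nil => rfl
  | cons x xs ih =>
    have hx := h x (by simp)
    simp only [fosFirstExceed, if_neg (by omega : ¬ mb < x)]
    exact ih fun y hy => h y (by simp [hy])

theorem fosFirstExceed_append_skip (mb : Int) (l1 l2 : List Int) (h : ∀ y ∈ l1, y ≤ mb) :
    fosFirstExceed mb (l1 ++ l2) = fosFirstExceed mb l2 := by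
  induction l1 with
  | nil => rfl
  | cons x xs ih =>
    have hx := h x (by simp)
    simp only [List.cons_append, fosFirstExceed, if_neg (by omega : ¬ mb < x)]
    exact ih fun y hy => h y (by simp [hy])

theorem fosFirstExceed_mem_left (mb : Int) (l1 l2 : List Int) (h : ∃ y ∈ l1, mb < y) :
    ∃ c, fosFirstExceed mb (l1 ++ l2) = some c ∧ c ∈ l1 := by
  induction l1 with
  | nil => simp at h
  | cons x xs ih =>
    by_cases hx : mb < x
    · exact ⟨x, by simp [fosFirstExceed, hx], by simp⟩
    · obtain ⟨y, hy, hmy⟩ := h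
      rcases List.mem_cons.mp hy with rfl | hy'
      · omega
      · obtain ⟨c, hc, hcm⟩ := ih ⟨y, hy', hmy⟩
        exact ⟨c, by simpa [fosFirstExceed, hx] using hc, by simp [hcm]⟩

theorem find?_range_eq_some (p : Nat → Bool) (k : Nat) (hpk : p k = true)
    (hlow : ∀ j < k, p j = false) : ∀ N, k < N → (List.range N).find? p = some k := by
  intro N
  induction N with
  | zero => omega
  | succ n ih =>
    intro hk
    rw [List.range_succ, List.find?_append]
    rcases Nat.lt_or_ge k n with h | h
    · rw [ih h]; rfl
    · have hkn : k = n := by omega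
      subst hkn
      have hnone : (List.range k).find? p = none := by
        rw [List.find?_eq_none]
        intro j hj
        simp [hlow j (List.mem_range.mp hj)]
      simp [hnone, List.find?, hpk]

-- ===== VERDICT (by name: the statement is the Claim_ definition above) =====
theorem find_optimal_solution_spec : Claim_equal_find_optimal_solution := by
  intro candidates _ hpre
  unfold Spec_find_optimal_solution find_optimal_solution find_optimal_solution_alt
  rcases hmax : PySem.List.max? candidates (fun y => y) with _ | largest
  · rfl
  have hlmem : largest ∈ candidates := PySem.List.max?_mem hmax
  have hlmax : ∀ y ∈ candidates, y ≤ largest := by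
    intro y hy; exact PySem.List.max?_isMax hmax y hy
  rcases hidx : PySem.List.index? candidates largest with _ | m
  · rw [PySem.List.index?_eq_none_iff] at hidx
    exact absurd hlmem hidx
  obtain ⟨hmlt, hgetm, hfirstm⟩ := PySem.List.getElem_of_index?_eq_some hidx
  dsimp only
  rw [fosOuter_eq_find?, hidx]
  dsimp only
  by_cases hm0 : m = 0
  · -- global max is first: every outer iteration finds nothing, A returns None like B
    subst hm0
    rw [if_pos rfl, List.find?_eq_none]
    intro i hi
    have hi' := PySem.List.mem_pyRange_one.mp hi
    rw [PySem.List.len_eq] at hi'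
    have h0 : 0 ≤ i := by omega
    have h1 : 1 ≤ i.toNat := by omega
    have hitn : i.toNat < candidates.length := by omega
    unfold fosCond
    rw [PySem.List.slice_to candidates h0, PySem.List.slice_from candidates h0]
    have hlm : largest ∈ candidates.take i.toNat := by
      rw [List.mem_take_iff_getElem]
      exact ⟨0, by omega, hgetm⟩
    rcases hp : PySem.List.max? (candidates.take i.toNat) (fun y => y) with _ | P
    · rw [PySem.List.max?_eq_none_iff, List.take_eq_nil_iff] at hp
      clear hlm
      rcases hp with h | h
      · omega
      · exact absurd h hpre
    have hPle : P ≤ largest := hlmax P (List.mem_of_mem_take (PySem.List.max?_mem hp))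
    have hleP : largest ≤ P := PySem.List.max?_isMax hp largest hlm
    have hfe : fosFirstExceed P (candidates.drop i.toNat) = none := by
      apply fosFirstExceed_none
      intro y hy
      have := hlmax y (List.mem_of_mem_drop hy)
      omega
    simp [hfe]
  · -- global max at index m ≥ 1
    rw [if_neg hm0, PySem.List.slice_to_natCast candidates m]
    obtain ⟨pre, hpredef⟩ : ∃ pre, candidates.take m = pre := ⟨_, rfl⟩
    rw [hpredef]
    have hprelen : pre.length = m := by rw [← hpredef]; simp; omega
    have hprene : pre ≠ [] := by
      intro h; rw [h] at hprelen; simp at hprelen; omega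
    have hpresub : ∀ y ∈ pre, y ∈ candidates := by
      intro y hy; rw [← hpredef] at hy; exact List.mem_of_mem_take hy
    have hprelt : ∀ y ∈ pre, y < largest := by
      intro y hy
      have hy' : y ∈ candidates.take m := by rw [hpredef]; exact hy
      obtain ⟨j, hj, hgj⟩ := List.mem_iff_getElem.mp hy'
      have hjm : j < m := by simp at hj; omega
      rw [List.getElem_take] at hgj
      have hne := hfirstm j hjm
      have hle := hlmax y (hpresub y hy)
      rw [hgj] at hne; omega
    rcases hq : PySem.List.max? pre (fun y => y) with _ | Q
    · simp [PySem.List.max?_eq_none_iff, hprene] at hq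
    have hQmem : Q ∈ pre := PySem.List.max?_mem hq
    have hQmax : ∀ y ∈ pre, y ≤ Q := fun y hy => PySem.List.max?_isMax hq y hy
    have hQlt : Q < largest := hprelt Q hQmem
    rcases hqi : PySem.List.index? pre Q with _ | qi
    · rw [PySem.List.index?_eq_none_iff] at hqi
      exact absurd hQmem hqi
    obtain ⟨hqilt, hgetqi, hfirstqi⟩ := PySem.List.getElem_of_index?_eq_some hqi
    rw [hprelen] at hqilt
    -- decompose candidates = pre ++ largest :: suf
    obtain ⟨suf, hsufdef⟩ : ∃ suf, candidates.drop (m + 1) = suf := ⟨_, rfl⟩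
    have hdecomp : candidates = pre ++ largest :: suf := by
      rw [← hpredef, ← hsufdef, ← hgetm, ← List.drop_eq_getElem_cons hmlt, List.take_append_drop]
    -- characterize A's loop condition at each k (loop variable i = 1 + k)
    have htake : ∀ k : Nat, k < m → candidates.take (k + 1) = pre.take (k + 1) := by
      intro k hk
      conv_lhs => rw [hdecomp]
      exact List.take_append_of_le_length (by omega)
    have hdrop : ∀ k : Nat, k < m → candidates.drop (k + 1) = pre.drop (k + 1) ++ largest :: suf := by
      intro k hk
      conv_lhs => rw [hdecomp]
      exact List.drop_append_of_le_length (by omega)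
    have hcond_true : fosCond candidates largest (1 + (qi : Int)) = true := by
      unfold fosCond
      have hcast : (1 : Int) + (qi : Int) = ((qi + 1 : Nat) : Int) := by push_cast; ring
      rw [hcast, PySem.List.slice_to_natCast candidates (qi + 1),
        PySem.List.slice_from_natCast candidates (qi + 1), htake qi hqilt, hdrop qi hqilt]
      have hQin : Q ∈ pre.take (qi + 1) := by
        rw [List.mem_take_iff_getElem]
        exact ⟨qi, by omega, hgetqi⟩
      rcases hp : PySem.List.max? (pre.take (qi + 1)) (fun y => y) with _ | P
      · simp [PySem.List.max?_eq_none_iff] at hp; simp [hp] at hQin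
      have hPQ : P = Q := by
        have h1 : P ≤ Q := hQmax P (List.mem_of_mem_take (PySem.List.max?_mem hp))
        have h2 : Q ≤ P := PySem.List.max?_isMax hp Q hQin
        omega
      have hskip : fosFirstExceed P (pre.drop (qi + 1) ++ largest :: suf) =
          fosFirstExceed P (largest :: suf) := by
        apply fosFirstExceed_append_skip
        intro y hy
        have := hQmax y (List.mem_of_mem_drop hy)
        omega
      rw [Option.getD_some, hskip]
      have : fosFirstExceed P (largest :: suf) = some largest := by
        simp [fosFirstExceed, if_pos (by omega : P < largest)]
      simp [this]
    have hcond_false : ∀ k : Nat, k < qi → fosCond candidates largest (1 + (k : Int)) = false := by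
      intro k hk
      unfold fosCond
      have hcast : (1 : Int) + (k : Int) = ((k + 1 : Nat) : Int) := by push_cast; ring
      rw [hcast, PySem.List.slice_to_natCast candidates (k + 1),
        PySem.List.slice_from_natCast candidates (k + 1), htake k (by omega), hdrop k (by omega)]
      rcases hp : PySem.List.max? (pre.take (k + 1)) (fun y => y) with _ | P
      · simp [PySem.List.max?_eq_none_iff, List.take_eq_nil_iff, hprene] at hp
      have hPmem : P ∈ pre := List.mem_of_mem_take (PySem.List.max?_mem hp)
      have hPle : P ≤ Q := hQmax P hPmem
      have hPne : P ≠ Q := by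
        intro hPQ
        obtain ⟨j, hj, hgj⟩ := List.mem_iff_getElem.mp (hPQ ▸ PySem.List.max?_mem hp)
        rw [List.getElem_take] at hgj
        have : j < qi := by simp at hj; omega
        exact hfirstqi j this hgj
      have hQdrop : Q ∈ pre.drop (k + 1) := by
        rw [List.mem_iff_getElem]
        refine ⟨qi - (k + 1), by simp; omega, ?_⟩
        rw [List.getElem_drop]
        convert hgetqi using 2
        omega
      obtain ⟨c, hc, hcm⟩ := fosFirstExceed_mem_left P (pre.drop (k + 1)) (largest :: suf)
        ⟨Q, hQdrop, by omega⟩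
      have hclt : c < largest := hprelt c (List.mem_of_mem_drop hcm)
      simp [hc]
      omega
    -- assemble: A's find? over range(1, len) returns 1 + qi
    rw [PySem.List.len_eq, PySem.List.pyRange_one, List.find?_map]
    have hNtoNat : ((candidates.length : Int) - 1).toNat = candidates.length - 1 := by omega
    rw [hNtoNat]
    simp only [Function.comp_def]
    have hqlt : qi < candidates.length - 1 := by omega
    rw [find?_range_eq_some (fun k => fosCond candidates largest (1 + (k : Int)))
      qi hcond_true (fun j hj => hcond_false j hj) (candidates.length - 1) hqlt]
    rw [hqi]
    simp
    omega

theorem pvWitness_ok : Dom_find_optimal_solution pvWitness_find_optimal_solution ∧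
    Pre_find_optimal_solution pvWitness_find_optimal_solution := by decide
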